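-- pv_equiv track=rewrite | github.com/yunfeixie233/TextArena | textarena/envs/two_player/car_puzzle.py | _parse_puzzle_creator_submission
-- ===== SOURCE A (Python) =====
-- from typing import Any, Dict, Optional, Tuple
--
-- def _parse_puzzle_creator_submission(submission: str) -> Tuple[list, list]:
--     """
--     Parse the submission from the Puzzle Creator.
--
--     Args:
--         submission (str): The submission string.
--
--     Returns:
--         Tuple[list, list]: (puzzle_data, solution_steps)
--     """
--     lines = submission.strip().split('\n')
--     puzzle_data = []
--     solution_steps = []
--     in_solution = False
--     for line in lines:
--         line = line.strip()
--         if not line: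
--             continue
--         if line.startswith('[Move]'):
--             in_solution = True
--         if in_solution:
--             solution_steps.append(line)
--         else:
--             puzzle_data.append(line)
--     if not solution_steps:
--         raise ValueError("No solution steps provided.")
--     return puzzle_data, solution_steps
-- ===== SOURCE B (Python) =====
-- def _parse_puzzle_creator_submission(submission):
--     lines = [l.strip() for l in submission.strip().split('\n') if l.strip()]
--     idx = next((i for i, l in enumerate(lines) if l.startswith('[Move]')), None)
--     if idx is None:
--         raise ValueError("No solution steps provided.")
--     return lines[:idx], lines[idx:]
-- ===== Notes on version B (the rewrite author's own statement) =====
-- stated objective: simpler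
-- what changed: Replaces A's single stateful in_solution flag loop with a filter-then-locate-then-slice decomposition: clean the lines once, find the first '[Move]' line index, and split by slicing.
import Mathlib
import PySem

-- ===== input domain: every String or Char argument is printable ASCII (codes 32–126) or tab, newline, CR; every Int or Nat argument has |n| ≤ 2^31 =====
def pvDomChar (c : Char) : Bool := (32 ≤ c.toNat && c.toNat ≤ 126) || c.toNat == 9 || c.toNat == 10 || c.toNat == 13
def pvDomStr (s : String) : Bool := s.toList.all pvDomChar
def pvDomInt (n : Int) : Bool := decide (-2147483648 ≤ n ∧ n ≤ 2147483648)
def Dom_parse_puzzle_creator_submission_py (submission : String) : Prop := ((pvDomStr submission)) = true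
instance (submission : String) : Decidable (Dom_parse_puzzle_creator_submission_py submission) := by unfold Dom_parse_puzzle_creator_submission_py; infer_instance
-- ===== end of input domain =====

-- B replaces A's stateful in_solution flag loop by clean-then-locate-then-slice ("simpler"); equivalence of RETURN values on Pre_ (A raises ValueError outside it, and so does B).

-- ===== PORT A =====
-- the body of A's for-loop, as a fold step over (puzzle_data, solution_steps, in_solution)
def pvStepA (st : List String × List String × Bool) (line : String) : List String × List String × Bool :=
  let line := PySem.Str.strip line
  if line = "" then st
  else
    let inSol := if PySem.Str.startswith line "[Move]" then true else st.2.2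
    if inSol then (st.1, st.2.1 ++ [line], inSol) else (st.1 ++ [line], st.2.1, inSol)

def parse_puzzle_creator_submission_py (submission : String) : List String × List String :=
  match (((PySem.Str.split? (PySem.Str.strip submission) "\n").getD []).foldl pvStepA ([], [], false)) with
  -- Python raises ValueError when solution_steps = []; those inputs are excluded by Pre_
  | (puzzle_data, solution_steps, _) => (puzzle_data, solution_steps)

-- ===== PORT B =====
-- B's cleaned line list: [l.strip() for l in … if l.strip()]
def pvClean (lines : List String) : List String :=
  (lines.map PySem.Str.strip).filter (fun l => l ≠ "")

def parse_puzzle_creator_submission_py_alt (submission : String) : List String × List String :=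
  match (pvClean ((PySem.Str.split? (PySem.Str.strip submission) "\n").getD [])).findIdx?
      (fun l => PySem.Str.startswith l "[Move]") with
  | none => ([], [])   -- Python B raises ValueError here; excluded by Pre_
  | some i => ((pvClean ((PySem.Str.split? (PySem.Str.strip submission) "\n").getD [])).take i,
               (pvClean ((PySem.Str.split? (PySem.Str.strip submission) "\n").getD [])).drop i)

-- ===== PRECONDITION & SPEC =====
-- Pre_: some line (after stripping) starts with '[Move]'; otherwise A (and B) raise ValueError.
def Pre_parse_puzzle_creator_submission_py (submission : String) : Prop :=
  (((PySem.Str.split? (PySem.Str.strip submission) "\n").getD []).any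
    (fun l => PySem.Str.startswith (PySem.Str.strip l) "[Move]")) = true
instance (submission : String) : Decidable (Pre_parse_puzzle_creator_submission_py submission) := by unfold Pre_parse_puzzle_creator_submission_py; infer_instance

def pvWitness_parse_puzzle_creator_submission_py : String := "3x3\n[Move] A right 1"

def Spec_parse_puzzle_creator_submission_py (submission : String) (out : List String × List String) : Prop := out = parse_puzzle_creator_submission_py_alt submission
instance (submission : String) (out : List String × List String) : Decidable (Spec_parse_puzzle_creator_submission_py submission out) := by unfold Spec_parse_puzzle_creator_submission_py; infer_instance

-- ===== CLAIM (what is proved, stated in full; the proofs are below) =====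
def Claim_equal_parse_puzzle_creator_submission_py : Prop := ∀ (submission : String), Dom_parse_puzzle_creator_submission_py submission → Pre_parse_puzzle_creator_submission_py submission → Spec_parse_puzzle_creator_submission_py submission (parse_puzzle_creator_submission_py submission)

-- ===== LEMMAS AND PROOFS =====

theorem pvClean_cons (l : String) (ls : List String) :
    pvClean (l :: ls) =
      if PySem.Str.strip l = "" then pvClean ls else PySem.Str.strip l :: pvClean ls := by
  simp [pvClean, List.filter]
  split_ifs with h <;> simp [h]

-- once in_solution is true, every remaining cleaned line goes to solution_steps
theorem foldl_stepA_true (lines : List String) (p s : List String) :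
    List.foldl pvStepA (p, s, true) lines = (p, s ++ pvClean lines, true) := by
  induction lines generalizing s with
  | nil => simp [pvClean]
  | cons l ls ih =>
    rw [pvClean_cons]
    by_cases h : PySem.Str.strip l = "" <;>
      simp [List.foldl, pvStepA, h, ih]

-- with in_solution still false, the fold splits the cleaned lines at the first '[Move]' line
theorem foldl_stepA_false (lines : List String) (p s : List String) :
    List.foldl pvStepA (p, s, false) lines =
      match (pvClean lines).findIdx? (fun l => PySem.Str.startswith l "[Move]") with
      | none => (p ++ pvClean lines, s, false)
      | some i => (p ++ (pvClean lines).take i, s ++ (pvClean lines).drop i, true) := by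
  induction lines generalizing p s with
  | nil => simp [pvClean]
  | cons l ls ih =>
    rw [pvClean_cons]
    by_cases h : PySem.Str.strip l = ""
    · simp only [List.foldl, pvStepA, h, if_pos rfl, if_true]
      exact ih p s
    · by_cases hm : PySem.Str.startswith (PySem.Str.strip l) "[Move]" = true
      · simp only [List.foldl, pvStepA, h, if_neg h, hm, if_true, if_false, List.findIdx?_cons, if_pos hm]
        rw [foldl_stepA_true]
        simp
      · simp only [List.foldl, pvStepA, h, if_neg h, Bool.not_eq_true] at *
        simp only [hm, List.findIdx?_cons, Bool.false_eq_true, if_false, ite_false]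
        rw [ih (p ++ [PySem.Str.strip l]) s]
        cases hfi : (pvClean ls).findIdx? (fun l => PySem.Str.startswith l "[Move]") <;>
          simp [List.take_succ_cons, List.drop_succ_cons]

-- a line starting with '[Move]' is nonempty
theorem startswith_move_ne_empty (l : String) (h : PySem.Str.startswith l "[Move]" = true) :
    l ≠ "" := by
  intro hl
  subst hl
  simp [PySem.Str.startswith] at h
  revert h
  decide

-- ===== VERDICT (by name: the statement is the Claim_ definition above) =====
theorem parse_puzzle_creator_submission_py_spec : Claim_equal_parse_puzzle_creator_submission_py := by
  intro submission _ hpre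
  unfold Spec_parse_puzzle_creator_submission_py
  unfold parse_puzzle_creator_submission_py parse_puzzle_creator_submission_py_alt
  rw [Pre_parse_puzzle_creator_submission_py] at hpre
  rw [foldl_stepA_false]
  have hsome : ((pvClean ((PySem.Str.split? (PySem.Str.strip submission) "\n").getD [])).findIdx?
      (fun l => PySem.Str.startswith l "[Move]")).isSome := by
    rw [List.findIdx?_isSome, List.any_eq_true]
    simp only [List.any_eq_true] at hpre
    obtain ⟨l, hl, hm⟩ := hpre
    refine ⟨PySem.Str.strip l, ?_, hm⟩
    simp only [pvClean, List.mem_filter, List.mem_map]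
    exact ⟨⟨l, hl, rfl⟩, by simpa using startswith_move_ne_empty _ hm⟩
  cases hfi : (pvClean ((PySem.Str.split? (PySem.Str.strip submission) "\n").getD [])).findIdx?
      (fun l => PySem.Str.startswith l "[Move]") with
  | none =>
    rw [List.findIdx?_eq_none_iff] at hfi
    rw [List.findIdx?_isSome, List.any_eq_true] at hsome
    obtain ⟨x, hx, hpx⟩ := hsome
    rw [hfi x hx] at hpx
    exact Bool.noConfusion hpx
  | some i => simp [hfi]
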